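-- pv_equiv track=rewrite | github.com/Domerius/cookbook | src/core/recipe.py | compressName
-- ===== SOURCE A (Python) =====
-- from string import punctuation, digits
--
-- def compressName(name: str) -> str:
--     """
--     Transform name of the recipe into a shortened form. Punctuation and digits are being removed from input.
--     """
--
--     # Erase all punctuation and digits and seperate remaining words
--     nameSplit = name.translate(str.maketrans('', '', punctuation + digits)).split()
--
--     # Join words together into the compressed name
--     if len(nameSplit) == 0:
--         raise TypeError(f"Wrong input name: {name}.")
--     elif len(nameSplit) == 1:
--         # Leave the word as it is
--         return nameSplit[0].capitalize()
--     else: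
--         # Conjoin each word
--         return ''.join(word.capitalize() for word in nameSplit)
-- ===== SOURCE B (Python) =====
-- from string import punctuation, digits
--
-- _REMOVE = frozenset(punctuation + digits)
--
--
-- def compressName(name: str) -> str:
--     # Single left-to-right scan with a word-start flag: no split, no per-word
--     # capitalize pass; characters are cased as they are emitted.
--     out = []
--     at_start = True
--     for c in name:
--         if c.isspace():
--             at_start = True
--         elif c in _REMOVE:
--             pass
--         else:
--             out.append(c.upper() if at_start else c.lower())
--             at_start = False
--     if not out:
--         raise TypeError(f"Wrong input name: {name}.")
--     return ''.join(out)
-- ===== Notes on version B (the rewrite author's own statement) =====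
-- stated objective: alternative
-- what changed: B is a single-pass character scanner with a word-start flag that cases each kept character on the fly (upper at a word start, lower otherwise), instead of A's staged translate-whole-string, split into words, then per-word capitalize-and-join.
-- outside the precondition, e.g. on compressName('123 - !'): A raises TypeError, B raises TypeError
import Mathlib
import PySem

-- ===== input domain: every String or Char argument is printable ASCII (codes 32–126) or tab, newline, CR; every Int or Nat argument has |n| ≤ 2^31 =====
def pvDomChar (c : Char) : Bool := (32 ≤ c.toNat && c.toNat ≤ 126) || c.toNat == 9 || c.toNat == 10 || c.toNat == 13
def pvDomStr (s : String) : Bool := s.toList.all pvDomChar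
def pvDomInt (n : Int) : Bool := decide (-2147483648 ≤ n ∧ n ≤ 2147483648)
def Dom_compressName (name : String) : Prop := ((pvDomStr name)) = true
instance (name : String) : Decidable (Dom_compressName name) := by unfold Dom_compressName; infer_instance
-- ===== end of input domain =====

-- B replaces A's staged translate/split/capitalize-join with a single left-to-right
-- character scan carrying a word-start flag (objective: alternative, same cost).

-- ===== PORT A =====
-- string.punctuation + string.digits (the translation table of A deletes exactly these chars)
def pvBadChars : List Char := "!\"#$%&'()*+,-./:;<=>?@[\\]^_`{|}~0123456789".toList

-- word.capitalize(): first char uppercased, rest lowercased (exact on ASCII)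
def pvCapitalize (w : List Char) : List Char :=
  match w with
  | [] => []
  | c :: rest => PySem.Chars.upperChar c :: PySem.Chars.lower rest

def compressName (name : String) : String :=
  -- name.translate(str.maketrans('', '', punctuation + digits)).split()
  let nameSplit := PySem.Chars.split₀ (name.toList.filter (fun c => !(pvBadChars.contains c)))
  if nameSplit.length = 0 then ""   -- Python raises TypeError here; excluded by Pre_
  else if nameSplit.length = 1 then String.ofList (pvCapitalize (nameSplit.headD []))
  else String.ofList (PySem.Chars.join [] (nameSplit.map pvCapitalize))

-- ===== PORT B =====
def pvRemoveB : List Char := "!\"#$%&'()*+,-./:;<=>?@[\\]^_`{|}~0123456789".toList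

-- the for-loop of Source B: state = (output so far is the list built up; at_start flag)
def pvScanB : List Char → Bool → List Char
  | [], _ => []
  | c :: rest, atStart =>
    if PySem.Chars.isspace c then pvScanB rest true
    else if pvRemoveB.contains c then pvScanB rest atStart
    else (if atStart then PySem.Chars.upperChar c else PySem.Chars.lowerChar c) ::
      pvScanB rest false

def compressName_alt (name : String) : String :=
  let out := pvScanB name.toList true
  if out.isEmpty then ""            -- Python raises TypeError here; excluded by Pre_
  else String.ofList out

-- ===== PRECONDITION & SPEC =====
-- Pre_ excludes exactly the inputs with no character that survives (non-punctuation,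
-- non-digit, non-whitespace): there A (and B) raise TypeError.
def Pre_compressName (name : String) : Prop :=
  (name.toList.any (fun c =>
    !(("!\"#$%&'()*+,-./:;<=>?@[\\]^_`{|}~0123456789".toList).contains c)
      && !(PySem.Chars.isspace c))) = true
instance (name : String) : Decidable (Pre_compressName name) := by
  unfold Pre_compressName; infer_instance

def pvWitness_compressName : String := "chili con carne 2.0"

def Spec_compressName (name : String) (out : String) : Prop := out = compressName_alt name
instance (name : String) (out : String) : Decidable (Spec_compressName name out) := by
  unfold Spec_compressName; infer_instance

-- ===== CLAIM (what is proved, stated in full; the proofs are below) =====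
def Claim_equal_compressName : Prop :=
  ∀ (name : String), Dom_compressName name → Pre_compressName name →
    Spec_compressName name (compressName name)

-- ===== LEMMAS AND PROOFS =====

-- removed chars (punctuation/digits) are never whitespace
theorem pvBad_not_space : ∀ c ∈ pvBadChars, PySem.Chars.isspace c = false := by
  intro c hc
  have h := List.all_eq_true.mp (show pvBadChars.all (fun c => !PySem.Chars.isspace c) = true
    by decide) c hc
  simpa using h

theorem modifyHead_fun_id (l : List (List Char)) : l.modifyHead (fun h => h) = l := by
  cases l <;> simp

-- split₀.go characterised through splitOnP
theorem go_eq (cs : List Char) : ∀ (cur : List Char) (acc : List (List Char)),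
    PySem.Chars.split₀.go cs cur acc =
      acc.reverse ++ (((cs.splitOnP (fun c => PySem.Chars.isspace c)).modifyHead
        (fun h => cur.reverse ++ h)).filter (fun w => !w.isEmpty)) := by
  induction cs with
  | nil =>
    intro cur acc
    rcases e : cur with _ | ⟨c, cur'⟩ <;>
      simp [PySem.Chars.split₀.go, List.splitOnP_nil]
  | cons c rest ih =>
    intro cur acc
    by_cases hs : PySem.Chars.isspace c = true
    · rcases cur with _ | ⟨d, cur'⟩
      · simp [PySem.Chars.split₀.go, hs, ih, List.splitOnP_cons, modifyHead_fun_id]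
      · simp [PySem.Chars.split₀.go, hs, ih, List.splitOnP_cons, modifyHead_fun_id]
    · obtain ⟨hd, tl, heq⟩ : ∃ hd tl,
          rest.splitOnP (fun c => PySem.Chars.isspace c) = hd :: tl := by
        rcases e : rest.splitOnP (fun c => PySem.Chars.isspace c) with _ | ⟨hd, tl⟩
        · exact absurd e (List.splitOnP_ne_nil _ rest)
        · exact ⟨hd, tl, rfl⟩
      simp [PySem.Chars.split₀.go, hs, ih, List.splitOnP_cons, heq]

theorem split₀_eq_splitOnP (cs : List Char) :
    PySem.Chars.split₀ cs =
      (cs.splitOnP (fun c => PySem.Chars.isspace c)).filter (fun w => !w.isEmpty) := by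
  have h := go_eq cs [] []
  simpa [PySem.Chars.split₀, modifyHead_fun_id] using h

-- ''.join(map capitalize) over the word list (join '' = flatten)
def pvCapFlat (ws : List (List Char)) : List Char := (ws.map pvCapitalize).flatten

theorem join_nil_flatten (l : List (List Char)) : PySem.Chars.join [] l = l.flatten := by
  simp only [PySem.Chars.join, List.intercalate]
  induction l with
  | nil => simp
  | cons a l ih =>
    cases l with
    | nil => simp
    | cons b r => simpa [List.intersperse] using ih

-- dropping an empty head word is invisible to pvCapFlat
theorem capFlat_filter (hd : List Char) (tl : List (List Char)) :
    pvCapFlat ((hd :: tl).filter (fun w => !w.isEmpty)) =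
      pvCapitalize hd ++ pvCapFlat (tl.filter (fun w => !w.isEmpty)) := by
  rcases hd with _ | ⟨c, w⟩
  · simp [pvCapFlat, pvCapitalize]
  · simp [pvCapFlat]

-- the scanner's value in terms of the splitOnP decomposition of the bad-char-free string
theorem scan_eq (cs : List Char) : ∀ (flag : Bool),
    pvScanB cs flag =
      (match (cs.filter (fun c => !(pvRemoveB.contains c))).splitOnP
          (fun c => PySem.Chars.isspace c) with
        | [] => []
        | hd :: tl =>
          (if flag then pvCapitalize hd else PySem.Chars.lower hd) ++
            pvCapFlat (tl.filter (fun w => !w.isEmpty))) := by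
  induction cs with
  | nil =>
    intro flag
    cases flag <;> simp [pvScanB, List.splitOnP_nil, pvCapitalize,
      PySem.Chars.lower, pvCapFlat]
  | cons c rest ih =>
    intro flag
    obtain ⟨hd, tl, heq⟩ : ∃ hd tl,
        (rest.filter (fun c => !(pvRemoveB.contains c))).splitOnP
          (fun c => PySem.Chars.isspace c) = hd :: tl := by
      rcases e : (rest.filter (fun c => !(pvRemoveB.contains c))).splitOnP
          (fun c => PySem.Chars.isspace c) with _ | ⟨hd, tl⟩
      · exact absurd e (List.splitOnP_ne_nil _ _)
      · exact ⟨hd, tl, rfl⟩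
    by_cases hs : PySem.Chars.isspace c = true
    · have hgood : (!(pvRemoveB.contains c)) = true := by
        by_contra h
        have hmem : c ∈ pvRemoveB := by simpa using h
        exact absurd hs (by simp [pvBad_not_space c hmem])
      have hfc : List.filter (fun c => !(pvRemoveB.contains c)) (c :: rest)
          = c :: List.filter (fun c => !(pvRemoveB.contains c)) rest := by
        simp only [List.filter_cons, hgood, if_true]
      rw [hfc, List.splitOnP_cons, if_pos hs, heq]
      rw [show pvScanB (c :: rest) flag = pvScanB rest true from by
        simp [pvScanB, hs], ih true, heq]
      cases flag <;> simp [pvCapitalize, PySem.Chars.lower, capFlat_filter]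
    · by_cases hb : pvRemoveB.contains c = true
      · have hmem : c ∈ pvRemoveB := by simpa using hb
        have hgood : (!(pvRemoveB.contains c)) = false := by rw [hb]; rfl
        have hfc : List.filter (fun c => !(pvRemoveB.contains c)) (c :: rest)
            = List.filter (fun c => !(pvRemoveB.contains c)) rest := by
          simp only [List.filter_cons, hgood, Bool.false_eq_true, if_false]
        rw [hfc]
        rw [show pvScanB (c :: rest) flag = pvScanB rest flag from by
          simp [pvScanB, hs, hmem], ih flag]
      · have hnmem : c ∉ pvRemoveB := by simpa using hb
        have hgood : (!(pvRemoveB.contains c)) = true := by simpa using hb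
        have hfc : List.filter (fun c => !(pvRemoveB.contains c)) (c :: rest)
            = c :: List.filter (fun c => !(pvRemoveB.contains c)) rest := by
          simp only [List.filter_cons, hgood, if_true]
        rw [hfc, List.splitOnP_cons, if_neg hs, heq]
        rw [show pvScanB (c :: rest) flag =
              (if flag then PySem.Chars.upperChar c else PySem.Chars.lowerChar c) ::
                pvScanB rest false from by simp [pvScanB, hs, hnmem], ih false, heq]
        cases flag <;> simp [pvCapitalize, PySem.Chars.lower, List.modifyHead]

-- scanner started at a word start = capitalize-join of A's word list
theorem scan_true_eq (cs : List Char) :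
    pvScanB cs true =
      pvCapFlat (PySem.Chars.split₀ (cs.filter (fun c => !(pvBadChars.contains c)))) := by
  have hBB : pvRemoveB = pvBadChars := rfl
  rw [split₀_eq_splitOnP, ← hBB, scan_eq cs true]
  obtain ⟨hd, tl, heq⟩ : ∃ hd tl,
      (cs.filter (fun c => !(pvRemoveB.contains c))).splitOnP
        (fun c => PySem.Chars.isspace c) = hd :: tl := by
    rcases e : (cs.filter (fun c => !(pvRemoveB.contains c))).splitOnP
        (fun c => PySem.Chars.isspace c) with _ | ⟨hd, tl⟩
    · exact absurd e (List.splitOnP_ne_nil _ _)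
    · exact ⟨hd, tl, rfl⟩
  rw [heq]
  simp [capFlat_filter]

-- every word produced by split₀ is nonempty
theorem split₀_nonempty (cs : List Char) :
    ∀ w ∈ PySem.Chars.split₀ cs, w ≠ [] := by
  intro w hw
  rw [split₀_eq_splitOnP] at hw
  have := List.of_mem_filter hw
  simpa using this

-- pvCapFlat of a split₀ word list is empty exactly when the word list is
theorem capFlat_empty_iff (cs : List Char) :
    (pvCapFlat (PySem.Chars.split₀ cs)).isEmpty = (PySem.Chars.split₀ cs).isEmpty := by
  rcases e : PySem.Chars.split₀ cs with _ | ⟨w, tl⟩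
  · simp [pvCapFlat]
  · have hw : w ≠ [] := split₀_nonempty cs w (by simp [e])
    rcases w with _ | ⟨c, w'⟩
    · exact absurd rfl hw
    · simp [pvCapFlat, pvCapitalize]

-- A's three-way branch equals the uniform capitalize-join (with "" for the empty case)
theorem branch_eq (ws : List (List Char)) :
    (if ws.length = 0 then ""
     else if ws.length = 1 then String.ofList (pvCapitalize (ws.headD []))
     else String.ofList (PySem.Chars.join [] (ws.map pvCapitalize)))
      = if ws.isEmpty then ""
        else String.ofList (pvCapFlat ws) := by
  rcases ws with _ | ⟨w, _ | ⟨w', rest⟩⟩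
  · simp
  · simp [pvCapFlat]
  · simp [join_nil_flatten, pvCapFlat]

-- ===== VERDICT (by name: the statement is the Claim_ definition above) =====
theorem compressName_spec : Claim_equal_compressName := by
  intro name _ _
  unfold Spec_compressName
  simp only [compressName, compressName_alt, scan_true_eq]
  rw [branch_eq, capFlat_empty_iff]
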